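-- pv_equiv track=rewrite | github.com/Akerdidik/AdvancedPythonLab | Parser/clone.py | justifier
-- ===== SOURCE A (Python) =====
-- def justifier(lister) -> list:
--     res = []
--
--     for i in range(len(lister)):
--
--         if i+1!=len(lister):
--
--             if i%2==0:
--
--                 temp = lister[i] - lister[i+1]
--                 res.append(temp)
--
--     return res
-- ===== SOURCE B (Python) =====
-- def justifier(lister) -> list:
--     it = iter(lister)
--     return [a - b for a, b in zip(it, it)]
-- ===== Notes on version B (the rewrite author's own statement) =====
-- stated objective: idiomatic
-- what changed: Replaces the index loop over range(len) with its boundary and parity tests by the standard iterator-pairing idiom zip(it, it), which consumes the list two elements at a time and subtracts each pair directly.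
import Mathlib
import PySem

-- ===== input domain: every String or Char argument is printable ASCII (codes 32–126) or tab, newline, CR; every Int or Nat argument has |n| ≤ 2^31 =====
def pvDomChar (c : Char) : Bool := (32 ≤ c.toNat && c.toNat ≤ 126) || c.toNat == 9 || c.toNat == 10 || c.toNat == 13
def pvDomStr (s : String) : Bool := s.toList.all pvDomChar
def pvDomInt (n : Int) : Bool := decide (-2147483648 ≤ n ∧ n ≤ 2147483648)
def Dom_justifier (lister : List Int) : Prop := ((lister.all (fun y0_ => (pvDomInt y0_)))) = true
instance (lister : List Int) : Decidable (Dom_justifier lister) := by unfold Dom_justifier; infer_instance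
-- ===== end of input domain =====

-- B replaces A's index loop with parity/boundary tests by the iterator-pairing idiom
-- zip(it, it) that consumes the list two elements at a time (idiomatic; same cost).

-- ===== PORT A =====
-- literal port of A: loop i over range(len(lister)), append lister[i] - lister[i+1]
-- when i+1 != len(lister) and i % 2 == 0
def justifier (lister : List Int) : List Int :=
  (PySem.List.pyRange 0 (lister.length : Int) 1).foldl
    (fun res i =>
      if i + 1 ≠ (lister.length : Int) then
        if PySem.Int.mod i 2 = 0 then
          res ++ [PySem.List.pyGetD lister i 0 - PySem.List.pyGetD lister (i + 1) 0]
        else res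
      else res)
    []

-- ===== PORT B =====
-- port of Source B: zip(it, it) pairs consecutive elements two at a time (a trailing
-- unpaired element is dropped), subtracting within each pair
def justifier_alt : List Int → List Int
  | a :: b :: rest => (a - b) :: justifier_alt rest
  | _ => []

-- ===== PRECONDITION & SPEC =====
def Spec_justifier (lister : List Int) (out : List Int) : Prop := out = justifier_alt lister
instance (lister : List Int) (out : List Int) : Decidable (Spec_justifier lister out) := by unfold Spec_justifier; infer_instance

-- ===== CLAIM (what is proved, stated in full; the proofs are below) =====
def Claim_equal_justifier : Prop := ∀ (lister : List Int), Dom_justifier lister → Spec_justifier lister (justifier lister)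

-- ===== LEMMAS AND PROOFS =====

-- A's loop in Nat-indexed filter/map normal form
def justifierCore (xs : List Int) : List Int :=
  ((List.range xs.length).filter
      (fun k => decide (k + 1 ≠ xs.length) && decide (k % 2 = 0))).map
    (fun k => xs.getD k 0 - xs.getD (k + 1) 0)

lemma justifier_eq_core (xs : List Int) : justifier xs = justifierCore xs := by
  unfold justifier justifierCore
  have hfun : (fun (res : List Int) (i : Int) =>
      if i + 1 ≠ (xs.length : Int) then
        if PySem.Int.mod i 2 = 0 then
          res ++ [PySem.List.pyGetD xs i 0 - PySem.List.pyGetD xs (i + 1) 0]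
        else res
      else res)
    = (fun res i =>
      if (decide (i + 1 ≠ (xs.length : Int)) && decide (PySem.Int.mod i 2 = 0)) then
        res ++ [PySem.List.pyGetD xs i 0 - PySem.List.pyGetD xs (i + 1) 0]
      else res) := by
    funext res i
    by_cases h1 : i + 1 ≠ (xs.length : Int) <;> by_cases h2 : PySem.Int.mod i 2 = 0 <;>
      simp [h1, h2]
  rw [hfun, PySem.List.foldl_append_if, PySem.List.pyRange_zero_natCast, List.filter_map,
      List.map_map, List.nil_append]
  have hfil : List.filter ((fun i : Int => decide (i + 1 ≠ (xs.length : Int)) && decide (PySem.Int.mod i 2 = 0)) ∘ (fun k : Nat => (k : Int))) (List.range xs.length)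
      = List.filter (fun k => decide (k + 1 ≠ xs.length) && decide (k % 2 = 0)) (List.range xs.length) := by
    apply List.filter_congr
    intro k hk
    simp only [Function.comp]
    congr 1
    · simp only [decide_eq_decide]
      omega
    · simp only [decide_eq_decide, PySem.Int.mod, Int.fmod_eq_emod]
      omega
  rw [hfil]
  apply List.map_congr_left
  intro k hk
  have hc : ((k : Int) + 1) = ((k + 1 : Nat) : Int) := by push_cast; ring
  simp only [Function.comp]
  rw [hc, PySem.List.pyGetD_natCast, PySem.List.pyGetD_natCast]

-- shifting all indices down by 2 turns the filtered/mapped range over a::b::rest into the one over rest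
lemma shift_lemma (a b : Int) (rest : List Int) (l : List Nat) :
    List.map ((fun k => (a :: b :: rest).getD k 0 - (a :: b :: rest).getD (k + 1) 0) ∘ (Nat.succ ∘ Nat.succ))
      (List.filter ((fun k => decide (k + 1 ≠ rest.length + 1 + 1) && decide (k % 2 = 0)) ∘ (Nat.succ ∘ Nat.succ)) l)
    = List.map (fun k => rest.getD k 0 - rest.getD (k + 1) 0)
      (List.filter (fun k => decide (k + 1 ≠ rest.length) && decide (k % 2 = 0)) l) := by
  induction l with
  | nil => rfl
  | cons x xs ih =>
    simp only [List.filter_cons, Function.comp, Nat.succ_eq_add_one]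
    by_cases hx : x + 1 ≠ rest.length ∧ x % 2 = 0
    · rw [if_pos (by simp only [Bool.and_eq_true, decide_eq_true_eq]; omega),
          if_pos (by simp only [Bool.and_eq_true, decide_eq_true_eq]; omega),
          List.map_cons, List.map_cons, ih]
      simp [Function.comp]
    · rw [if_neg (by simp only [Bool.and_eq_true, decide_eq_true_eq]; omega),
          if_neg (by simp only [Bool.and_eq_true, decide_eq_true_eq]; omega), ih]

lemma core_cons₂ (a b : Int) (rest : List Int) :
    justifierCore (a :: b :: rest) = (a - b) :: justifierCore rest := by
  unfold justifierCore
  simp only [List.length_cons]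
  rw [List.range_succ_eq_map, List.range_succ_eq_map, List.map_cons, List.map_map]
  rw [List.filter_cons_of_pos (by simp), List.filter_cons_of_neg (by simp)]
  simp only [List.map_cons]
  rw [List.filter_map, List.map_map]
  exact congrArg (List.cons (a - b)) (shift_lemma a b rest (List.range rest.length))

lemma core_eq_alt (xs : List Int) : justifierCore xs = justifier_alt xs := by
  induction xs using justifier_alt.induct with
  | case1 a b rest ih => rw [core_cons₂, ih, justifier_alt]
  | case2 xs h => cases xs with
    | nil => rfl
    | cons a t => cases t with
      | nil => simp [justifierCore, justifier_alt]
      | cons b r => exact absurd rfl (h a b r)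

-- ===== VERDICT (by name: the statement is the Claim_ definition above) =====
theorem justifier_spec : Claim_equal_justifier := by
  intro xs _
  show justifier xs = justifier_alt xs
  rw [justifier_eq_core, core_eq_alt]
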